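-- pv_equiv track=rewrite | github.com/DrsBvB0499/process-document-agent | agent/system_architecture_generator.py | _identify_digital_opportunities
-- ===== SOURCE A (Python) =====
-- from typing import Dict, List, Any, Optional
--
-- def _identify_digital_opportunities(
--
--     facts: List[Dict],
--     systems: List[Dict]
-- ) -> List[str]:
--     """
--     Identify digital transformation opportunities.
--     """
--     opportunities = []
--
--     # Check for manual integrations
--     manual_count = sum(1 for s in systems if "manual" in s.get("name", "").lower())
--     if manual_count > 0:
--         opportunities.append(f"Automate {manual_count} manual system integration(s)")
--
--     # Check for desktop applications
--     desktop_systems = [s for s in systems if s.get("category") == "Desktop Application"]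
--     if desktop_systems:
--         opportunities.append(f"Migrate {len(desktop_systems)} desktop application(s) to cloud-based alternatives")
--
--     # Check for on-premise systems
--     on_prem = [s for s in systems if s.get("deployment") == "on-premise"]
--     if on_prem:
--         opportunities.append(f"Consider cloud migration for {len(on_prem)} on-premise system(s)")
--
--     # Check for manual data entry
--     manual_steps = [f for f in facts if "manual" in f.get("fact", "").lower() and f.get("category") == "process_steps"]
--     if manual_steps:
--         opportunities.append(f"Digitize {len(manual_steps)} manual process step(s)")
--
--     return opportunities
-- ===== SOURCE B (Python) =====
-- _RULES = [
--     ("automate", "Automate ", " manual system integration(s)"),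
--     ("migrate",  "Migrate ", " desktop application(s) to cloud-based alternatives"),
--     ("onprem",   "Consider cloud migration for ", " on-premise system(s)"),
--     ("digitize", "Digitize ", " manual process step(s)"),
-- ]
--
--
-- def _system_tags(s):
--     tags = []
--     if "manual" in s.get("name", "").lower():
--         tags.append("automate")
--     if s.get("category") == "Desktop Application":
--         tags.append("migrate")
--     if s.get("deployment") == "on-premise":
--         tags.append("onprem")
--     return tags
--
--
-- def _fact_tags(f):
--     if "manual" in f.get("fact", "").lower() and f.get("category") == "process_steps":
--         return ["digitize"]
--     return []
--
--
-- def _identify_digital_opportunities(facts, systems):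
--     """Table-driven: classify every record into opportunity tags, then render
--     one message per rule that has at least one tag, using the tag's count."""
--     tags = [t for s in systems for t in _system_tags(s)]
--     tags += [t for f in facts for t in _fact_tags(f)]
--     return [pre + str(tags.count(tag)) + suf
--             for tag, pre, suf in _RULES if tag in tags]
-- ===== Notes on version B (the rewrite author's own statement) =====
-- stated objective: alternative
-- what changed: B is table-driven: it classifies every system/fact record into opportunity tags via a flatMap into one tag multiset, then renders one message per entry of a fixed rule table (prefix/suffix around the tag's count) for each tag that occurs, instead of A's four hard-coded filter/sum passes each followed by its own append.
import Mathlib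
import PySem

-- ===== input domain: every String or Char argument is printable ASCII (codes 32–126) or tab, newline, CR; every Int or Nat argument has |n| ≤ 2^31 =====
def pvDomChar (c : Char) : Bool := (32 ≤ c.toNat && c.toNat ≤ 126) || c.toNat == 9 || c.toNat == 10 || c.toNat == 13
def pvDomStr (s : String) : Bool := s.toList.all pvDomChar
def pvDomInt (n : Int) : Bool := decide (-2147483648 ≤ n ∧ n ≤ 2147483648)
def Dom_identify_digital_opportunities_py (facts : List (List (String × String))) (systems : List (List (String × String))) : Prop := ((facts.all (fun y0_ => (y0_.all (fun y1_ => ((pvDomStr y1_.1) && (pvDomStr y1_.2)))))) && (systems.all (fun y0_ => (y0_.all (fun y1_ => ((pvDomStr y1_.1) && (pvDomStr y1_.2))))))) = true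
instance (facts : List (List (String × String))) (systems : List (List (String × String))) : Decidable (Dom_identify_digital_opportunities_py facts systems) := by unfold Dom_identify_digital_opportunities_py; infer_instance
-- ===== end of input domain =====

-- B is table-driven: records are classified into opportunity tags (one multiset built by
-- flatMap), and messages are rendered from a fixed rule table using the tag counts;
-- objective: alternative decomposition, same cost.

-- dict lookup on an association list: first match (shared helper of both ports)
def dget? (d : List (String × String)) (k : String) : Option String :=
  (d.find? (fun p => p.1 == k)).map (·.2)

def dgetD (d : List (String × String)) (k dflt : String) : String :=
  (dget? d k).getD dflt

-- ===== PORT A =====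
def identify_digital_opportunities_py (facts : List (List (String × String))) (systems : List (List (String × String))) : List String :=
  let opportunities : List String := []
  let manual_count : Int :=
    systems.foldl (fun acc s => acc + (if PySem.Str.isIn "manual" (PySem.Str.lower (dgetD s "name" "")) then 1 else 0)) 0
  let opportunities :=
    if manual_count > 0 then
      opportunities ++ ["Automate " ++ PySem.Int.toStr manual_count ++ " manual system integration(s)"]
    else opportunities
  let desktop_systems := systems.filter (fun s => dget? s "category" == some "Desktop Application")
  let opportunities :=
    if desktop_systems.isEmpty then opportunities
    else opportunities ++ ["Migrate " ++ PySem.Int.toStr (desktop_systems.length : Int) ++ " desktop application(s) to cloud-based alternatives"]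
  let on_prem := systems.filter (fun s => dget? s "deployment" == some "on-premise")
  let opportunities :=
    if on_prem.isEmpty then opportunities
    else opportunities ++ ["Consider cloud migration for " ++ PySem.Int.toStr (on_prem.length : Int) ++ " on-premise system(s)"]
  let manual_steps := facts.filter (fun f => PySem.Str.isIn "manual" (PySem.Str.lower (dgetD f "fact" "")) && dget? f "category" == some "process_steps")
  let opportunities :=
    if manual_steps.isEmpty then opportunities
    else opportunities ++ ["Digitize " ++ PySem.Int.toStr (manual_steps.length : Int) ++ " manual process step(s)"]
  opportunities

-- ===== PORT B =====
-- the rule table: (tag, prefix, suffix); message = prefix ++ str(count) ++ suffix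
-- (Source B's `pre + str(n) + suf` rendering, transcribed literally)
def pvRules : List (String × String × String) :=
  [("automate", "Automate ", " manual system integration(s)"),
   ("migrate", "Migrate ", " desktop application(s) to cloud-based alternatives"),
   ("onprem", "Consider cloud migration for ", " on-premise system(s)"),
   ("digitize", "Digitize ", " manual process step(s)")]

def systemTags (s : List (String × String)) : List String :=
  let tags : List String := []
  let tags := if PySem.Str.isIn "manual" (PySem.Str.lower (dgetD s "name" "")) then tags ++ ["automate"] else tags
  let tags := if dget? s "category" == some "Desktop Application" then tags ++ ["migrate"] else tags
  if dget? s "deployment" == some "on-premise" then tags ++ ["onprem"] else tags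

def factTags (f : List (String × String)) : List String :=
  if PySem.Str.isIn "manual" (PySem.Str.lower (dgetD f "fact" "")) && dget? f "category" == some "process_steps" then ["digitize"] else []

def identify_digital_opportunities_py_alt (facts : List (List (String × String))) (systems : List (List (String × String))) : List String :=
  let tags := systems.flatMap systemTags ++ facts.flatMap factTags
  pvRules.filterMap (fun r =>
    if tags.contains r.1 then some (r.2.1 ++ PySem.Int.toStr (tags.count r.1 : Int) ++ r.2.2) else none)

-- ===== PRECONDITION & SPEC =====
-- A Python dict cannot bind a key twice, so association lists that bind one of the keys the
-- function reads ("name", "category", "deployment", "fact") more than once correspond to no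
-- Python input; Pre_ excludes exactly those lists (no input the Python A accepts is excluded).
def Pre_identify_digital_opportunities_py (facts : List (List (String × String))) (systems : List (List (String × String))) : Prop :=
  (∀ f ∈ facts, ((f.map Prod.fst).count "fact" ≤ 1) ∧ ((f.map Prod.fst).count "category" ≤ 1)) ∧
  (∀ s ∈ systems, ((s.map Prod.fst).count "name" ≤ 1) ∧ ((s.map Prod.fst).count "category" ≤ 1) ∧ ((s.map Prod.fst).count "deployment" ≤ 1))
instance (facts : List (List (String × String))) (systems : List (List (String × String))) : Decidable (Pre_identify_digital_opportunities_py facts systems) := by unfold Pre_identify_digital_opportunities_py; infer_instance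
def pvWitness_identify_digital_opportunities_py : (List (List (String × String))) × (List (List (String × String))) :=
  ([[("fact", "Manual data entry"), ("category", "process_steps")]],
   [[("name", "manual sync"), ("category", "Desktop Application"), ("deployment", "on-premise")]])
def Spec_identify_digital_opportunities_py (facts : List (List (String × String))) (systems : List (List (String × String))) (out : List String) : Prop := out = identify_digital_opportunities_py_alt facts systems
instance (facts : List (List (String × String))) (systems : List (List (String × String))) (out : List String) : Decidable (Spec_identify_digital_opportunities_py facts systems out) := by unfold Spec_identify_digital_opportunities_py; infer_instance

-- ===== CLAIM (what is proved, stated in full; the proofs are below) =====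
def Claim_equal_identify_digital_opportunities_py : Prop := ∀ (facts : List (List (String × String))) (systems : List (List (String × String))), Dom_identify_digital_opportunities_py facts systems → Pre_identify_digital_opportunities_py facts systems → Spec_identify_digital_opportunities_py facts systems (identify_digital_opportunities_py facts systems)

-- ===== LEMMAS AND PROOFS =====

-- A's sum(1 for …) fold counts the predicate
lemma foldl_add_ite_count {α : Type} (p : α → Bool) (l : List α) (a : Int) :
    l.foldl (fun acc s => acc + (if p s then 1 else 0)) a = a + (l.countP p : Int) := by
  induction l generalizing a with
  | nil => simp
  | cons x xs ih =>
    simp only [List.foldl_cons, List.countP_cons, ih]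
    split_ifs <;> push_cast <;> ring

-- a flatMap whose per-element tag list carries `t` exactly when `p` holds counts `p`
lemma count_flatMap_countP {α : Type} (f : α → List String) (p : α → Bool) (t : String)
    (h : ∀ a, (f a).count t = if p a then 1 else 0) (l : List α) :
    (l.flatMap f).count t = l.countP p := by
  induction l with
  | nil => simp
  | cons x xs ih =>
    simp only [List.flatMap_cons, List.count_append, List.countP_cons, ih, h]
    split_ifs <;> omega

-- a flatMap whose per-element tag list never carries `t` counts zero
lemma count_flatMap_zero {α : Type} (f : α → List String) (t : String)
    (h : ∀ a, (f a).count t = 0) (l : List α) :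
    (l.flatMap f).count t = 0 := by
  induction l with
  | nil => simp
  | cons x xs ih => simp [List.count_append, h, ih]

lemma sysTags_count_automate (s : List (String × String)) :
    (systemTags s).count "automate" = if PySem.Str.isIn "manual" (PySem.Str.lower (dgetD s "name" "")) then 1 else 0 := by
  unfold systemTags; split_ifs <;> decide

lemma sysTags_count_migrate (s : List (String × String)) :
    (systemTags s).count "migrate" = if dget? s "category" == some "Desktop Application" then 1 else 0 := by
  unfold systemTags; split_ifs <;> decide

lemma sysTags_count_onprem (s : List (String × String)) :
    (systemTags s).count "onprem" = if dget? s "deployment" == some "on-premise" then 1 else 0 := by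
  unfold systemTags; split_ifs <;> decide

lemma sysTags_count_digitize (s : List (String × String)) :
    (systemTags s).count "digitize" = 0 := by
  unfold systemTags; split_ifs <;> decide

lemma factTags_count_digitize (f : List (String × String)) :
    (factTags f).count "digitize" = if (PySem.Str.isIn "manual" (PySem.Str.lower (dgetD f "fact" "")) && dget? f "category" == some "process_steps") then 1 else 0 := by
  unfold factTags; split_ifs <;> decide

lemma factTags_count_other (f : List (String × String)) (t : String) (ht : t ≠ "digitize") :
    (factTags f).count t = 0 := by
  unfold factTags; split_ifs <;> simp [List.count_singleton]
  exact fun h => ht h.symm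

-- contains ↔ nonzero count
lemma contains_iff_count_ne (l : List String) (t : String) :
    l.contains t = true ↔ l.count t ≠ 0 := by
  rw [List.contains_iff_mem]
  constructor
  · intro h; exact Nat.pos_iff_ne_zero.mp (List.count_pos_iff.mpr h)
  · intro h; exact List.count_pos_iff.mp (Nat.pos_iff_ne_zero.mpr h)

-- ===== VERDICT (by name: the statement is the Claim_ definition above) =====
theorem identify_digital_opportunities_py_spec : Claim_equal_identify_digital_opportunities_py := by
  intro facts systems _ _
  unfold Spec_identify_digital_opportunities_py identify_digital_opportunities_py identify_digital_opportunities_py_alt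
  have ca : (systems.flatMap systemTags ++ facts.flatMap factTags).count "automate"
      = systems.countP (fun s => PySem.Str.isIn "manual" (PySem.Str.lower (dgetD s "name" ""))) := by
    rw [List.count_append, count_flatMap_countP systemTags _ _ sysTags_count_automate,
      count_flatMap_zero factTags _ (fun f => factTags_count_other f _ (by decide))]
    simp
  have cm : (systems.flatMap systemTags ++ facts.flatMap factTags).count "migrate"
      = systems.countP (fun s => dget? s "category" == some "Desktop Application") := by
    rw [List.count_append, count_flatMap_countP systemTags _ _ sysTags_count_migrate,
      count_flatMap_zero factTags _ (fun f => factTags_count_other f _ (by decide))]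
    simp
  have co : (systems.flatMap systemTags ++ facts.flatMap factTags).count "onprem"
      = systems.countP (fun s => dget? s "deployment" == some "on-premise") := by
    rw [List.count_append, count_flatMap_countP systemTags _ _ sysTags_count_onprem,
      count_flatMap_zero factTags _ (fun f => factTags_count_other f _ (by decide))]
    simp
  have cd : (systems.flatMap systemTags ++ facts.flatMap factTags).count "digitize"
      = facts.countP (fun f => PySem.Str.isIn "manual" (PySem.Str.lower (dgetD f "fact" "")) && dget? f "category" == some "process_steps") := by
    rw [List.count_append, count_flatMap_zero systemTags _ sysTags_count_digitize,
      count_flatMap_countP factTags _ _ factTags_count_digitize]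
    simp
  simp only [pvRules, List.filterMap_cons, List.filterMap_nil, foldl_add_ite_count, zero_add,
    List.isEmpty_iff_length_eq_zero, ← List.countP_eq_length_filter,
    contains_iff_count_ne, ca, cm, co, cd, gt_iff_lt, Int.natCast_pos, Nat.pos_iff_ne_zero, ne_eq]
  split_ifs <;> simp_all
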